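-- pv_equiv track=rewrite | github.com/benquick123/code-profiling | code/batch-2/dn5 - tviti/M-17039-2236.py | tegi
-- ===== SOURCE A (Python) =====
-- def tegi(tvit):
--     omenjene_osebe = []
--     locen_tvit = tvit.split(" ")
--     for beseda in locen_tvit:
--         if '@' in beseda:
--             ociscena_beseda = izloci_besedo(beseda)
--             omenjene_osebe.append(ociscena_beseda)
--     return omenjene_osebe
--
-- def izloci_besedo(beseda):
--    cnt1 = 0
--    cnt2 = 0
--    dolzina = len(beseda)
--    for i in range (0, dolzina):
--                if beseda[i].isalnum() == True:
--                    break
--                if beseda[i].isalnum() == False: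
--                    cnt1 += 1
--    obrnejana_beseda = beseda[::-1]
--    for j in range (0, dolzina):
--         if obrnejana_beseda[j].isalnum() == True:
--             break
--         if obrnejana_beseda[j].isalnum() == False:
--             cnt2 += 1
--    x = dolzina - cnt2
--    return beseda[cnt1:x]
-- ===== SOURCE B (Python) =====
-- def _strip(beseda):
--     first = None
--     last = None
--     for i, ch in enumerate(beseda):
--         if ch.isalnum():
--             if first is None:
--                 first = i
--             last = i
--     return "" if first is None else beseda[first:last + 1]
--
-- def tegi(tvit):
--     return [_strip(beseda) for beseda in tvit.split(" ") if '@' in beseda]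
-- ===== Notes on version B (the rewrite author's own statement) =====
-- stated objective: simpler
-- what changed: The word-cleaning step is rewritten as a single forward pass that tracks the first and last alphanumeric index (instead of two scans: a forward count plus a count over the reversed string), and the outer loop becomes a list comprehension.
import Mathlib
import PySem

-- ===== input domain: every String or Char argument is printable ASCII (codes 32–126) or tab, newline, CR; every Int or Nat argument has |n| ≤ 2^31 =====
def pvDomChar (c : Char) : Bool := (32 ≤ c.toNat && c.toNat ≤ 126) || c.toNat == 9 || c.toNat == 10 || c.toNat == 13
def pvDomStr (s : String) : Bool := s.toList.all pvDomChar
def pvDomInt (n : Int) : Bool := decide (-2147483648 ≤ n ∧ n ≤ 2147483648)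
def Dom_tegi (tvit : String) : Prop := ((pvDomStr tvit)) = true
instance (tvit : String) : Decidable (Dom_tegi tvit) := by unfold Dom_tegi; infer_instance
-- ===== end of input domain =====

-- B replaces A's two boundary scans (forward count + count over the reversed word) by one
-- first/last-alnum tracking pass, and the outer loop by a comprehension (objective: simpler).

-- ===== PORT A =====
-- A's counting loop with break: leading non-alnum characters until the first alnum one
def pvCnt (cs : List Char) : Nat :=
  match cs with
  | [] => 0
  | c :: t => if PySem.Chars.isalnum c then 0 else pvCnt t + 1

def pvIzlociBesedo (beseda : List Char) : List Char :=
  let dolzina : Nat := beseda.length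
  let cnt1 : Nat := pvCnt beseda
  let obrnjena : List Char := beseda.reverse   -- beseda[::-1] (PySem.List.slice?_none_none_neg_one)
  let cnt2 : Nat := pvCnt obrnjena
  PySem.List.slice beseda (some (cnt1 : Int)) (some ((dolzina : Int) - (cnt2 : Int)))

def tegi (tvit : String) : List String :=
  (PySem.Chars.splitOn tvit.toList [' ']).foldl
    (fun acc beseda =>
      if beseda.contains '@' then acc ++ [String.ofList (pvIzlociBesedo beseda)] else acc) []

-- ===== PORT B =====
-- one pass: state = none | some (first, last) alnum indices seen so far
def pvScanStep (s : Option (Int × Int)) (ic : Int × Char) : Option (Int × Int) :=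
  if PySem.Chars.isalnum ic.2 then
    match s with
    | none => some (ic.1, ic.1)
    | some (f, _) => some (f, ic.1)
  else s

def pvStrip (beseda : List Char) : List Char :=
  match (PySem.List.enumerate beseda 0).foldl pvScanStep none with
  | none => []
  | some (f, l) => PySem.List.slice beseda (some f) (some (l + 1))

def tegi_alt (tvit : String) : List String :=
  ((PySem.Chars.splitOn tvit.toList [' ']).filter (fun b => b.contains '@')).map
    (fun beseda => String.ofList (pvStrip beseda))

-- ===== PRECONDITION & SPEC =====
def Spec_tegi (tvit : String) (out : List String) : Prop := out = tegi_alt tvit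
instance (tvit : String) (out : List String) : Decidable (Spec_tegi tvit out) := by unfold Spec_tegi; infer_instance

-- ===== CLAIM (what is proved, stated in full; the proofs are below) =====
def Claim_equal_tegi : Prop := ∀ (tvit : String), Dom_tegi tvit → Spec_tegi tvit (tegi tvit)

-- ===== LEMMAS AND PROOFS =====

theorem pvCnt_le (cs : List Char) : pvCnt cs ≤ cs.length := by
  induction cs with
  | nil => simp [pvCnt]
  | cons c t ih => simp only [pvCnt]; split <;> simp <;> omega

theorem pvCnt_of_no_alnum (cs : List Char) (h : cs.any PySem.Chars.isalnum = false) :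
    pvCnt cs = cs.length := by
  induction cs with
  | nil => simp [pvCnt]
  | cons c t ih =>
    simp only [List.any_cons, Bool.or_eq_false_iff] at h
    simp [pvCnt, h.1, ih h.2]

theorem pvCnt_append_of_any (xs ys : List Char) (h : xs.any PySem.Chars.isalnum = true) :
    pvCnt (xs ++ ys) = pvCnt xs := by
  induction xs with
  | nil => simp at h
  | cons c t ih =>
    simp only [List.any_cons, Bool.or_eq_true_iff] at h
    by_cases hc : PySem.Chars.isalnum c = true
    · simp [pvCnt, hc]
    · simp only [Bool.not_eq_true] at hc
      rcases h with h | h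
      · rw [hc] at h; exact absurd h (by simp)
      · simp [pvCnt, hc, ih h]

theorem pvCnt_append_of_none (xs ys : List Char) (h : xs.any PySem.Chars.isalnum = false) :
    pvCnt (xs ++ ys) = xs.length + pvCnt ys := by
  induction xs with
  | nil => simp
  | cons c t ih =>
    simp only [List.any_cons, Bool.or_eq_false_iff] at h
    simp [pvCnt, h.1, ih h.2]; omega

theorem pvScan_foldl (cs : List Char) (k : Int) (acc : Option (Int × Int)) :
    (PySem.List.enumerate cs k).foldl pvScanStep acc =
      if cs.any PySem.Chars.isalnum then
        some ((match acc with | some p => p.1 | none => k + pvCnt cs),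
              k + cs.length - 1 - pvCnt cs.reverse)
      else acc := by
  induction cs generalizing k acc with
  | nil => simp [PySem.List.enumerate]
  | cons c t ih =>
    rw [PySem.List.enumerate_cons]
    simp only [List.foldl_cons]
    by_cases hc : PySem.Chars.isalnum c = true
    · have hstep : pvScanStep acc (k, c) =
          some ((match acc with | some p => p.1 | none => k), k) := by
        cases acc <;> simp [pvScanStep, hc]
      rw [hstep, ih]
      by_cases ht : t.any PySem.Chars.isalnum = true
      · have hrev : pvCnt ((c :: t).reverse) = pvCnt t.reverse := by
          rw [List.reverse_cons]
          exact pvCnt_append_of_any _ _ (by simpa using ht)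
        simp only [ht, if_true, List.any_cons, hc, Bool.true_or, hrev]
        cases acc <;> simp [pvCnt, hc] <;> push_cast <;> omega
      · have ht' : t.any PySem.Chars.isalnum = false := by simpa using ht
        have hrev : pvCnt ((c :: t).reverse) = t.length := by
          rw [List.reverse_cons, pvCnt_append_of_none _ _ (by simpa using ht')]
          simp [pvCnt, hc]
        simp only [ht', List.any_cons, hc, Bool.true_or, if_true, hrev]
        cases acc <;> simp [pvCnt, hc] <;> push_cast <;> omega
    · have hc' : PySem.Chars.isalnum c = false := by simpa using hc
      have hstep : pvScanStep acc (k, c) = acc := by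
        cases acc <;> simp [pvScanStep, hc']
      rw [hstep, ih]
      by_cases ht : t.any PySem.Chars.isalnum = true
      · have hrev : pvCnt ((c :: t).reverse) = pvCnt t.reverse := by
          rw [List.reverse_cons]
          exact pvCnt_append_of_any _ _ (by simpa using ht)
        simp only [ht, if_true, List.any_cons, hc', Bool.false_or, hrev]
        cases acc <;> simp [pvCnt, hc'] <;> push_cast <;> omega
      · have ht' : t.any PySem.Chars.isalnum = false := by simpa using ht
        simp [ht', List.any_cons, hc']

theorem strip_eq (cs : List Char) : pvIzlociBesedo cs = pvStrip cs := by
  unfold pvIzlociBesedo pvStrip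
  rw [pvScan_foldl]
  by_cases h : cs.any PySem.Chars.isalnum = true
  · have hrev : pvCnt cs.reverse ≤ cs.length := by
      simpa using pvCnt_le cs.reverse
    simp only [h, if_true]
    have e2 : (cs.length : Int) - 1 - (pvCnt cs.reverse : Int) + 1
        = (cs.length : Int) - (pvCnt cs.reverse : Int) := by omega
    simp [e2]
  · have h' : cs.any PySem.Chars.isalnum = false := by simpa using h
    simp only [h', Bool.false_eq_true, if_false]
    have h1 : pvCnt cs = cs.length := pvCnt_of_no_alnum cs h'
    have h2 : pvCnt cs.reverse = cs.length := by
      rw [pvCnt_of_no_alnum cs.reverse (by simpa using h')]; simp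
    rw [h1, h2]
    have : (cs.length : Int) - cs.length = ((0 : Nat) : Int) := by simp
    rw [this, PySem.List.slice_natCast]
    simp

theorem foldl_if_append {α β : Type} (q : α → Bool) (g : α → β) (ws : List α) (acc : List β) :
    ws.foldl (fun acc b => if q b then acc ++ [g b] else acc) acc
      = acc ++ (ws.filter q).map g := by
  induction ws generalizing acc with
  | nil => simp
  | cons w t ih =>
    simp only [List.foldl_cons, List.filter_cons]
    by_cases hw : q w = true
    · simp [hw, ih]
    · simp [Bool.not_eq_true] at hw; simp [hw, ih]

-- ===== VERDICT (by name: the statement is the Claim_ definition above) =====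
theorem tegi_spec : Claim_equal_tegi := by
  intro tvit _
  unfold Spec_tegi tegi tegi_alt
  rw [foldl_if_append]
  simp only [List.nil_append]
  exact List.map_congr_left (fun b _ => by rw [strip_eq])
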